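-- pv_equiv track=rewrite | github.com/martinabaizan/Game-of-life | game_of_life.py | left_neighbours
-- ===== SOURCE A (Python) =====
-- def left_neighbours(board,size,x,y):
--     neighbours = []
--     for x in range(size):
--         neighbours.append(0) #first column has no left neighbours (compute as o)
--         for y in range(size -1):
--             neighbours.append(board[x][y]) #second column has first column as left neighbours, etc.
--     matrix_left_neighbours = [neighbours[x:x + size] for x in range(0, len(neighbours), size)]  # create matrix
--     return matrix_left_neighbours
-- ===== SOURCE B (Python) =====
-- def left_neighbours(board, size, x, y):
--     return [[0 if j == 0 else board[i][j - 1] for j in range(size)] for i in range(size)]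
-- ===== Notes on version B (the rewrite author's own statement) =====
-- stated objective: simpler
-- what changed: B computes each cell directly from the index formula result[i][j] = 0 if j == 0 else board[i][j-1] in a nested comprehension over range(size) x range(size); A instead appends everything into one flat size*size list (a 0 then a row prefix per row) and re-slices that flat list back into rows.
import Mathlib
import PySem

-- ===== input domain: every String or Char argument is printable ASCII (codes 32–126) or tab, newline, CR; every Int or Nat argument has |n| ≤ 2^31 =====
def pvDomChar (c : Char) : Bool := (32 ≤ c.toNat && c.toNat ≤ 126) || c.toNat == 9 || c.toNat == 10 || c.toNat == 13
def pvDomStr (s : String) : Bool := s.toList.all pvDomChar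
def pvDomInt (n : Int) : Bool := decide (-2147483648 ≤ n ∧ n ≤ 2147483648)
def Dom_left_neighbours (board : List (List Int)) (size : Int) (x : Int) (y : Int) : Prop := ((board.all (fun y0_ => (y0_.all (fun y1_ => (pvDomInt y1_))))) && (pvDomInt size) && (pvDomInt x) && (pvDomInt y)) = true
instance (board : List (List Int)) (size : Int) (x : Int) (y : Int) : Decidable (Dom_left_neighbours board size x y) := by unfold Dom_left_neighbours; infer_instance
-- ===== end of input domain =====

-- B computes each cell from the index formula result[i][j] = 0 if j==0 else board[i][j-1] instead of A's flatten-then-reslice; objective: simpler (return value only; neither mutates).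


-- ===== PORT A =====
def left_neighbours (board : List (List Int)) (size : Int) (x : Int) (y : Int) : List (List Int) :=
  let neighbours : List Int :=
    (PySem.List.pyRange 0 size 1).foldl
      (fun acc xi =>
        (PySem.List.pyRange 0 (size - 1) 1).foldl
          (fun acc2 yi => acc2 ++ [PySem.List.pyGetD (PySem.List.pyGetD board xi []) yi 0])
          (acc ++ [0]))
      []
  (PySem.List.pyRange 0 (neighbours.length : Int) size).map
    (fun i => PySem.List.slice neighbours (some i) (some (i + size)))

-- ===== PORT B =====
def left_neighbours_alt (board : List (List Int)) (size : Int) (x : Int) (y : Int) : List (List Int) :=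
  (PySem.List.pyRange 0 size 1).map
    (fun i =>
      (PySem.List.pyRange 0 size 1).map
        (fun j => if j = 0 then (0 : Int)
                  else PySem.List.pyGetD (PySem.List.pyGetD board i []) (j - 1) 0))

-- ===== PRECONDITION & SPEC =====
-- Pre_ excludes exactly the inputs on which A raises: size == 0 (range() with step 0 is a
-- ValueError) and, for size ≥ 2, boards that do not supply size rows each of length ≥ size-1
-- (IndexError on board[x] or board[x][y]). Everywhere A returns, Pre_ holds.
def Pre_left_neighbours (board : List (List Int)) (size : Int) (x : Int) (y : Int) : Prop :=
  size ≠ 0 ∧ (2 ≤ size → size ≤ (board.length : Int) ∧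
    ∀ r ∈ board.take size.toNat, size - 1 ≤ (r.length : Int))
instance (board : List (List Int)) (size : Int) (x : Int) (y : Int) : Decidable (Pre_left_neighbours board size x y) := by unfold Pre_left_neighbours; infer_instance

def pvWitness_left_neighbours : List (List Int) × Int × Int × Int := ([[1, 2], [3, 4]], 2, 0, 0)

def Spec_left_neighbours (board : List (List Int)) (size : Int) (x : Int) (y : Int) (out : List (List Int)) : Prop := out = left_neighbours_alt board size x y
instance (board : List (List Int)) (size : Int) (x : Int) (y : Int) (out : List (List Int)) : Decidable (Spec_left_neighbours board size x y out) := by unfold Spec_left_neighbours; infer_instance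

-- ===== CLAIM (what is proved, stated in full; the proofs are below) =====
def Claim_equal_left_neighbours : Prop := ∀ (board : List (List Int)) (size : Int) (x : Int) (y : Int), Dom_left_neighbours board size x y → Pre_left_neighbours board size x y → Spec_left_neighbours board size x y (left_neighbours board size x y)

-- ===== LEMMAS AND PROOFS =====

-- range(a, a, s) is empty for any step
theorem pyRange_self_eq_nil (a s : Int) : PySem.List.pyRange a a s = [] := by
  simp [PySem.List.pyRange]

-- the row both programs produce for row index k (m = size - 1)
def pvRowB (board : List (List Int)) (m k : Nat) : List Int :=
  0 :: (board.getD k []).take m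

theorem flatMap_sing {α β : Type} (f : α → β) (l : List α) :
    List.flatMap (fun k => [f k]) l = List.map f l := by
  induction l with
  | nil => rfl
  | cons a t ih => simp [ih]

theorem map_getD_range (row : List Int) (m : Nat) (hm : m ≤ row.length) :
    (List.range m).map (fun k => row.getD k 0) = row.take m := by
  apply List.ext_getElem
  · simp [Nat.min_eq_left hm]
  · intro i h1 h2
    simp at h1
    simp [List.getElem?_eq_getElem (h1.trans_le hm)]

-- inner loop of A: appending row[y] for y in range(m) appends row.take m
theorem pvInner (row : List Int) (m : Nat) (hm : m ≤ row.length) (acc : List Int) :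
    (PySem.List.pyRange 0 (m : Int) 1).foldl
      (fun acc2 yi => acc2 ++ [PySem.List.pyGetD row yi 0]) acc = acc ++ row.take m := by
  rw [PySem.List.foldl_append_eq_flatMap]
  congr 1
  rw [PySem.List.pyRange_zero_nat, List.flatMap_map]
  have h1 : ∀ k ∈ List.range m,
      (fun k : Nat => [PySem.List.pyGetD row (k : Int) 0]) k = (fun k : Nat => [row.getD k 0]) k := by
    intro k hk
    simp only [List.mem_range] at hk
    show [PySem.List.pyGetD row (k : Int) 0] = [row.getD k 0]
    rw [PySem.List.pyGetD_natCast]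
  rw [List.flatMap_congr h1, flatMap_sing, map_getD_range row m hm]

-- B's row for row index k equals pvRowB
theorem pvRowAlt (board : List (List Int)) (m k : Nat) (hm : m ≤ (board.getD k []).length) :
    (PySem.List.pyRange 0 ((m + 1 : Nat) : Int) 1).map
      (fun j => if j = 0 then (0 : Int)
                else PySem.List.pyGetD (PySem.List.pyGetD board (k : Int) []) (j - 1) 0)
      = pvRowB board m k := by
  rw [PySem.List.pyRange_zero_nat, List.map_map, List.range_succ_eq_map, List.map_cons,
    List.map_map]
  have h0 : (Function.comp (fun j : Int => if j = 0 then (0 : Int)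
      else PySem.List.pyGetD (PySem.List.pyGetD board (k : Int) []) (j - 1) 0)
      (fun n : Nat => (n : Int))) 0 = (0 : Int) := by simp
  rw [h0]
  unfold pvRowB
  congr 1
  have h1 : ∀ j ∈ List.range m,
      (Function.comp (Function.comp (fun j : Int => if j = 0 then (0 : Int)
        else PySem.List.pyGetD (PySem.List.pyGetD board (k : Int) []) (j - 1) 0)
        (fun n : Nat => (n : Int))) Nat.succ) j
      = (fun j : Nat => (board.getD k []).getD j 0) j := by
    intro j _
    have hne : ((Nat.succ j : Nat) : Int) ≠ 0 := by
      simp [Nat.succ_eq_add_one]; omega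
    have hsub : ((Nat.succ j : Nat) : Int) - 1 = ((j : Nat) : Int) := by
      simp [Nat.succ_eq_add_one]
    simp only [Function.comp]
    rw [if_neg hne, hsub, PySem.List.pyGetD_natCast, PySem.List.pyGetD_natCast]
  rw [List.map_congr_left h1, map_getD_range _ m hm]

-- reading back chunk k of length n from a flattened list of equal-length rows
theorem pvChunk (f : Nat → List Int) (c n : Nat) (hf : ∀ j < c, (f j).length = n) :
    ∀ k < c, (((List.range c).flatMap f).drop (n * k)).take n = f k := by
  induction c generalizing f with
  | zero => intro k hk; omega
  | succ c ih =>
    have hsplit : (List.range (c + 1)).flatMap f = f 0 ++ (List.range c).flatMap (fun j => f (j + 1)) := by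
      rw [List.range_succ_eq_map]
      simp [List.flatMap_cons, List.flatMap_map]
    intro k hk
    rcases k with _ | k
    · simp [hsplit, List.take_left' (hf 0 (Nat.succ_pos c))]
    · have hlen0 : (f 0).length = n := hf 0 (Nat.succ_pos c)
      have : n * (k + 1) = (f 0).length + n * k := by rw [hlen0]; ring
      rw [hsplit, this, List.drop_length_add_append]
      exact ih (fun j => f (j + 1)) (fun j hj => hf (j + 1) (by omega)) k (by omega)

-- ===== VERDICT =====
theorem left_neighbours_spec : Claim_equal_left_neighbours := by
  intro board size x y _ hpre
  unfold Spec_left_neighbours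
  by_cases hs : size ≤ 0
  · have hneg : size < 0 := lt_of_le_of_ne hs hpre.1
    simp [left_neighbours, left_neighbours_alt, PySem.List.pyRange_one_eq_nil hs,
      pyRange_self_eq_nil]
  · rw [not_le] at hs
    obtain ⟨m, rfl⟩ : ∃ m : Nat, size = (m : Int) + 1 := ⟨(size - 1).toNat, by omega⟩
    have hrow : ∀ k, k < m + 1 → m ≤ (board.getD k []).length := by
      rcases Nat.eq_zero_or_pos m with h0 | hposm
      · intro k _; simp [h0]
      · obtain ⟨hlen', hrow'⟩ := hpre.2 (by exact_mod_cast by omega)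
        have hlen : m + 1 ≤ board.length := by exact_mod_cast hlen'
        intro k hk
        have hkb : k < board.length := by omega
        have hmem : board[k] ∈ board.take ((m : Int) + 1).toNat := by
          have : ((m : Int) + 1).toNat = m + 1 := by omega
          rw [this]
          exact List.mem_take_iff_getElem.mpr ⟨k, by omega, by simp⟩
        have := hrow' _ hmem
        have : m ≤ board[k].length := by omega
        simpa [List.getD, List.getElem?_eq_getElem hkb] using this
    -- normalise casts: (m:Int)+1 = ((m+1 : Nat) : Int)
    have hcast : (m : Int) + 1 = ((m + 1 : Nat) : Int) := by push_cast; ring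
    -- outer loop produces the flattened rows
    have houter :
        (PySem.List.pyRange 0 ((m : Int) + 1) 1).foldl
          (fun acc xi =>
            (PySem.List.pyRange 0 ((m : Int) + 1 - 1) 1).foldl
              (fun acc2 yi => acc2 ++ [PySem.List.pyGetD (PySem.List.pyGetD board xi []) yi 0])
              (acc ++ [0]))
          [] = (List.range (m + 1)).flatMap (pvRowB board m) := by
      rw [hcast, PySem.List.pyRange_zero_nat, List.foldl_map]
      rw [PySem.List.foldl_congr_mem _ _ (fun acc k => acc ++ pvRowB board m k) _ ?_]
      · rw [PySem.List.foldl_append_eq_flatMap]; simp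
      · intro acc k hk
        simp only [List.mem_range] at hk
        have h1 : (((m + 1 : Nat) : Int)) - 1 = ((m : Nat) : Int) := by push_cast; ring
        rw [h1, PySem.List.pyGetD_natCast, pvInner _ m (hrow k hk)]
        simp [pvRowB]
    have hrowlen : ∀ j, j < m + 1 → (pvRowB board m j).length = m + 1 := by
      intro j hj
      have h := hrow j hj
      simp [pvRowB] at h ⊢
      omega
    have hflatlen : ((List.range (m + 1)).flatMap (pvRowB board m)).length = (m + 1) * (m + 1) := by
      rw [List.length_flatMap]
      rw [List.map_congr_left (fun j hj => hrowlen j (List.mem_range.mp hj))]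
      simp [List.map_const']
    -- the reshape range: range(0, (m+1)*(m+1), m+1) = [(m+1)*k for k in range(m+1)]
    have hstep : PySem.List.pyRange 0 (((m + 1) * (m + 1) : Nat) : Int) ((m : Int) + 1) =
        (List.range (m + 1)).map (fun k : Nat => ((m : Int) + 1) * (k : Int)) := by
      rw [PySem.List.pyRange_of_pos _ _ (by positivity)]
      have hpos : (0 : Int) < (((m + 1) * (m + 1) : Nat) : Int) := by positivity
      rw [if_pos hpos]
      have harith : ((((m + 1) * (m + 1) : Nat) : Int) - 0 + ((m : Int) + 1) - 1) / ((m : Int) + 1)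
          = ((m : Int) + 1) := by
        have : (((m + 1) * (m + 1) : Nat) : Int) - 0 + ((m : Int) + 1) - 1
            = ((m : Int)) + ((m : Int) + 1) * ((m : Int) + 1) := by push_cast; ring
        rw [this, Int.add_mul_ediv_left _ _ (by omega),
          Int.ediv_eq_zero_of_lt (by positivity) (by omega)]
        ring
      rw [harith]
      have : (((m : Int) + 1)).toNat = m + 1 := by omega
      rw [this]
      apply List.map_congr_left
      intro k _
      simp
    -- finish: both sides are the list of rows
    show left_neighbours board ((m : Int) + 1) x y = _
    rw [left_neighbours, left_neighbours_alt]
    simp only [houter, hflatlen]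
    rw [hstep, List.map_map]
    rw [hcast, PySem.List.pyRange_zero_nat, List.map_map]
    apply List.ext_getElem
    · simp
    · intro i hi1 hi2
      simp only [List.getElem_map, List.getElem_range, Function.comp]
      have hi : i < m + 1 := by simpa using hi1
      have hleft : PySem.List.slice ((List.range (m + 1)).flatMap (pvRowB board m))
            (some (((m + 1 : Nat) : Int) * (i : Int)))
            (some (((m + 1 : Nat) : Int) * (i : Int) + ((m + 1 : Nat) : Int)))
          = pvRowB board m i := by
        have hc1 : ((m + 1 : Nat) : Int) * (i : Int) = (((m + 1) * i : Nat) : Int) := by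
          push_cast; ring
        have hc2 : ((m + 1 : Nat) : Int) * (i : Int) + ((m + 1 : Nat) : Int)
            = (((m + 1) * i : Nat) : Int) + ((m + 1 : Nat) : Int) := by push_cast; ring
        rw [hc2, hc1, PySem.List.slice_natCast_add]
        exact pvChunk (pvRowB board m) (m + 1) (m + 1) hrowlen i hi
      rw [hleft]
      have hB := pvRowAlt board m i (hrow i hi)
      rw [PySem.List.pyRange_zero_nat] at hB
      exact hB.symm
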